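-- pv_equiv track=rewrite | github.com/SimeonChifligarov/Alpha_Judge_Softuni | Python_Basics/PB_More_Exercises/06_Nested_Loops_More_Exercises/03_Lucky_Numbers_advanced.py | generate_lucky_numbers
-- ===== SOURCE A (Python) =====
-- def generate_lucky_numbers(N):
--     lucky_numbers = []
--     for d1 in range(1, 10):
--         for d2 in range(1, 10):
--             for d3 in range(1, 10):
--                 for d4 in range(1, 10):
--                     sum_first_two = d1 + d2
--                     sum_last_two = d3 + d4
--
--                     if sum_first_two == sum_last_two:
--                         if N % sum_first_two == 0:
--                             lucky_number = int(f'{d1}{d2}{d3}{d4}')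
--                             lucky_numbers.append(lucky_number)
--
--     return lucky_numbers
-- ===== SOURCE B (Python) =====
-- def generate_lucky_numbers(N):
--     by_sum = {}
--     for c in range(1, 10):
--         for d in range(1, 10):
--             by_sum.setdefault(c + d, []).append(10 * c + d)
--     result = []
--     for ab in range(11, 100):
--         a, b = divmod(ab, 10)
--         if b == 0:
--             continue
--         s = a + b
--         if N % s == 0:
--             result.extend(ab * 100 + cd for cd in by_sum[s])
--     return result
-- ===== Notes on version B (the rewrite author's own statement) =====
-- stated objective: simpler
-- what changed: A's four nested digit loops, each re-testing the pair-sum match, are replaced by a dict from digit-pair sum to its two-digit completions, built once, so B does a single loop over the two-digit prefixes with one dict lookup each.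
import Mathlib
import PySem

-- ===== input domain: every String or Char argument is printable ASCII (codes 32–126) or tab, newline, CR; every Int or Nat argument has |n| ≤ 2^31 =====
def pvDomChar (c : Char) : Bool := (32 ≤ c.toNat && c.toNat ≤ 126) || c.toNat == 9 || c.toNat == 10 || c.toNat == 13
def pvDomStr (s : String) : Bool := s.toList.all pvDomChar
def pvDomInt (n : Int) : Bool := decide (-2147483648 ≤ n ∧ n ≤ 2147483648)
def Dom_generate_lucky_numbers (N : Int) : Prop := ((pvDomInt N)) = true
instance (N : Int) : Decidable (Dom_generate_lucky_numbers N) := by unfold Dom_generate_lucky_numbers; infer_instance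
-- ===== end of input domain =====

-- B replaces A's four nested digit loops by a dict (digit-pair sum → two-digit completions) built once,
-- so the two inner loops become one lookup per two-digit prefix; objective: simpler/alternative, same result.

-- ===== PORT A =====
-- int(f'{d1}{d2}{d3}{d4}') is ported as ofStr? of the concatenated str(d)'s; the digits are 1..9,
-- so int() always succeeds and the `.getD 0` default is unreachable.
def generate_lucky_numbers (N : Int) : List Int :=
  (PySem.List.pyRange 1 10 1).foldl (fun lucky_numbers d1 =>
    (PySem.List.pyRange 1 10 1).foldl (fun lucky_numbers d2 =>
      (PySem.List.pyRange 1 10 1).foldl (fun lucky_numbers d3 =>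
        (PySem.List.pyRange 1 10 1).foldl (fun lucky_numbers d4 =>
          let sum_first_two := d1 + d2
          let sum_last_two := d3 + d4
          if sum_first_two == sum_last_two then
            if PySem.Int.mod N sum_first_two == 0 then
              lucky_numbers ++ [(PySem.Int.ofStr? (PySem.Int.toStr d1 ++ PySem.Int.toStr d2 ++
                PySem.Int.toStr d3 ++ PySem.Int.toStr d4)).getD 0]
            else lucky_numbers
          else lucky_numbers) lucky_numbers) lucky_numbers) lucky_numbers) []

-- ===== PORT B =====
-- by_sum.setdefault(c+d, []).append(10*c+d) is Dict.modify (c+d) [] (· ++ [10*c+d]);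
-- by_sum[s] is getD s [] — every s = a+b with digits 1..9 is a key, so the [] default is unreachable.
def generate_lucky_numbers_alt (N : Int) : List Int :=
  let by_sum : PySem.Dict Int (List Int) :=
    (PySem.List.pyRange 1 10 1).foldl (fun acc c =>
      (PySem.List.pyRange 1 10 1).foldl (fun acc d =>
        acc.modify (c + d) [] (fun l => l ++ [10 * c + d])) acc) PySem.Dict.empty
  (PySem.List.pyRange 11 100 1).foldl (fun result ab =>
    let a := PySem.Int.floordiv ab 10
    let b := PySem.Int.mod ab 10
    if b == 0 then result
    else
      let s := a + b
      if PySem.Int.mod N s == 0 then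
        result ++ (by_sum.getD s []).map (fun cd => ab * 100 + cd)
      else result) []

-- ===== PRECONDITION & SPEC =====
def Spec_generate_lucky_numbers (N : Int) (out : List Int) : Prop := out = generate_lucky_numbers_alt N
instance (N : Int) (out : List Int) : Decidable (Spec_generate_lucky_numbers N out) := by unfold Spec_generate_lucky_numbers; infer_instance

-- ===== CLAIM (what is proved, stated in full; the proofs are below) =====
def Claim_equal_generate_lucky_numbers : Prop := ∀ (N : Int), Dom_generate_lucky_numbers N → Spec_generate_lucky_numbers N (generate_lucky_numbers N)

-- ===== LEMMAS AND PROOFS =====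
set_option maxRecDepth 100000

def pvNum (d1 d2 d3 d4 : Int) : Int :=
  (PySem.Int.ofStr? (PySem.Int.toStr d1 ++ PySem.Int.toStr d2 ++
    PySem.Int.toStr d3 ++ PySem.Int.toStr d4)).getD 0

def pvBySum : PySem.Dict Int (List Int) :=
  (PySem.List.pyRange 1 10 1).foldl (fun acc c =>
    (PySem.List.pyRange 1 10 1).foldl (fun acc d =>
      acc.modify (c + d) [] (fun l => l ++ [10 * c + d])) acc) PySem.Dict.empty

def pvBlk (ab : Int) : List Int :=
  (pvBySum.getD (PySem.Int.floordiv ab 10 + PySem.Int.mod ab 10) []).map (fun cd => ab * 100 + cd)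

def pvGB (f : Int → Bool) (ab : Int) : List Int :=
  if PySem.Int.mod ab 10 == 0 then []
  else if f (PySem.Int.floordiv ab 10 + PySem.Int.mod ab 10) then pvBlk ab else []

lemma pvBySum_eval : pvBySum = PySem.Dict.mk [(2,[11]),(3,[12,21]),(4,[13,22,31]),(5,[14,23,32,41]),(6,[15,24,33,42,51]),(7,[16,25,34,43,52,61]),(8,[17,26,35,44,53,62,71]),(9,[18,27,36,45,54,63,72,81]),(10,[19,28,37,46,55,64,73,82,91]),(11,[29,38,47,56,65,74,83,92]),(12,[39,48,57,66,75,84,93]),(13,[49,58,67,76,85,94]),(14,[59,68,77,86,95]),(15,[69,78,87,96]),(16,[79,88,97]),(17,[89,98]),(18,[99])] := by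
  decide

lemma pv_divmod10 (a b : Int) (h1 : 1 ≤ b) (h2 : b ≤ 9) (h3 : 1 ≤ a) :
    PySem.Int.floordiv (10*a+b) 10 = a ∧ PySem.Int.mod (10*a+b) 10 = b := by
  have hd : PySem.Int.floordiv (10*a+b) 10 = a := by
    rw [PySem.Int.floordiv_eq_iff_of_pos (by norm_num)]; omega
  refine ⟨hd, ?_⟩
  have := PySem.Int.floordiv_mul_add_mod (10*a+b) 10
  rw [hd] at this; omega

-- A's result as a flatMap over the digit ranges
lemma pvLA (N : Int) :
    generate_lucky_numbers N =
      (PySem.List.pyRange 1 10 1).flatMap (fun d1 =>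
        (PySem.List.pyRange 1 10 1).flatMap (fun d2 =>
          (PySem.List.pyRange 1 10 1).flatMap (fun d3 =>
            ((PySem.List.pyRange 1 10 1).filter (fun d4 =>
                (d1 + d2 == d3 + d4) && (PySem.Int.mod N (d1 + d2) == 0))).map
              (pvNum d1 d2 d3)))) := by
  have h4 : ∀ (d1 d2 d3 : Int) (acc : List Int),
      (PySem.List.pyRange 1 10 1).foldl (fun acc d4 =>
        if d1 + d2 == d3 + d4 then
          (if PySem.Int.mod N (d1 + d2) == 0 then acc ++ [pvNum d1 d2 d3 d4] else acc)
        else acc) acc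
    = acc ++ ((PySem.List.pyRange 1 10 1).filter (fun d4 =>
        (d1 + d2 == d3 + d4) && (PySem.Int.mod N (d1 + d2) == 0))).map (pvNum d1 d2 d3) := by
    intro d1 d2 d3 acc
    rw [show (fun (acc : List Int) d4 =>
        if d1 + d2 == d3 + d4 then
          (if PySem.Int.mod N (d1 + d2) == 0 then acc ++ [pvNum d1 d2 d3 d4] else acc)
        else acc)
      = (fun (acc : List Int) d4 =>
        if (d1 + d2 == d3 + d4) && (PySem.Int.mod N (d1 + d2) == 0) then
          acc ++ [pvNum d1 d2 d3 d4] else acc) from by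
        funext acc d4
        cases h1 : (d1 + d2 == d3 + d4) <;> simp [h1]]
    exact PySem.List.foldl_append_if _ _ _ _
  have h3 : ∀ (d1 d2 : Int) (acc : List Int),
      (PySem.List.pyRange 1 10 1).foldl (fun acc d3 =>
        (PySem.List.pyRange 1 10 1).foldl (fun acc d4 =>
          if d1 + d2 == d3 + d4 then
            (if PySem.Int.mod N (d1 + d2) == 0 then acc ++ [pvNum d1 d2 d3 d4] else acc)
          else acc) acc) acc
    = acc ++ (PySem.List.pyRange 1 10 1).flatMap (fun d3 =>
        ((PySem.List.pyRange 1 10 1).filter (fun d4 =>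
          (d1 + d2 == d3 + d4) && (PySem.Int.mod N (d1 + d2) == 0))).map (pvNum d1 d2 d3)) := by
    intro d1 d2 acc
    rw [show (fun (acc : List Int) d3 =>
        (PySem.List.pyRange 1 10 1).foldl (fun acc d4 =>
          if d1 + d2 == d3 + d4 then
            (if PySem.Int.mod N (d1 + d2) == 0 then acc ++ [pvNum d1 d2 d3 d4] else acc)
          else acc) acc)
      = (fun (acc : List Int) d3 => acc ++ ((PySem.List.pyRange 1 10 1).filter (fun d4 =>
          (d1 + d2 == d3 + d4) && (PySem.Int.mod N (d1 + d2) == 0))).map (pvNum d1 d2 d3)) from by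
        funext acc d3; exact h4 d1 d2 d3 acc]
    exact PySem.List.foldl_append_eq_flatMap _ _ _
  have h2 : ∀ (d1 : Int) (acc : List Int),
      (PySem.List.pyRange 1 10 1).foldl (fun acc d2 =>
        (PySem.List.pyRange 1 10 1).foldl (fun acc d3 =>
          (PySem.List.pyRange 1 10 1).foldl (fun acc d4 =>
            if d1 + d2 == d3 + d4 then
              (if PySem.Int.mod N (d1 + d2) == 0 then acc ++ [pvNum d1 d2 d3 d4] else acc)
            else acc) acc) acc) acc
    = acc ++ (PySem.List.pyRange 1 10 1).flatMap (fun d2 =>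
        (PySem.List.pyRange 1 10 1).flatMap (fun d3 =>
          ((PySem.List.pyRange 1 10 1).filter (fun d4 =>
            (d1 + d2 == d3 + d4) && (PySem.Int.mod N (d1 + d2) == 0))).map (pvNum d1 d2 d3))) := by
    intro d1 acc
    rw [show (fun (acc : List Int) d2 =>
        (PySem.List.pyRange 1 10 1).foldl (fun acc d3 =>
          (PySem.List.pyRange 1 10 1).foldl (fun acc d4 =>
            if d1 + d2 == d3 + d4 then
              (if PySem.Int.mod N (d1 + d2) == 0 then acc ++ [pvNum d1 d2 d3 d4] else acc)
            else acc) acc) acc)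
      = (fun (acc : List Int) d2 => acc ++ (PySem.List.pyRange 1 10 1).flatMap (fun d3 =>
          ((PySem.List.pyRange 1 10 1).filter (fun d4 =>
            (d1 + d2 == d3 + d4) && (PySem.Int.mod N (d1 + d2) == 0))).map (pvNum d1 d2 d3))) from by
        funext acc d2; exact h3 d1 d2 acc]
    exact PySem.List.foldl_append_eq_flatMap _ _ _
  have h1 : generate_lucky_numbers N =
      (PySem.List.pyRange 1 10 1).foldl (fun acc d1 =>
        (PySem.List.pyRange 1 10 1).foldl (fun acc d2 =>
          (PySem.List.pyRange 1 10 1).foldl (fun acc d3 =>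
            (PySem.List.pyRange 1 10 1).foldl (fun acc d4 =>
              if d1 + d2 == d3 + d4 then
                (if PySem.Int.mod N (d1 + d2) == 0 then acc ++ [pvNum d1 d2 d3 d4] else acc)
              else acc) acc) acc) acc) [] := rfl
  rw [h1]
  rw [show (fun (acc : List Int) d1 =>
      (PySem.List.pyRange 1 10 1).foldl (fun acc d2 =>
        (PySem.List.pyRange 1 10 1).foldl (fun acc d3 =>
          (PySem.List.pyRange 1 10 1).foldl (fun acc d4 =>
            if d1 + d2 == d3 + d4 then
              (if PySem.Int.mod N (d1 + d2) == 0 then acc ++ [pvNum d1 d2 d3 d4] else acc)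
            else acc) acc) acc) acc)
    = (fun (acc : List Int) d1 => acc ++ (PySem.List.pyRange 1 10 1).flatMap (fun d2 =>
        (PySem.List.pyRange 1 10 1).flatMap (fun d3 =>
          ((PySem.List.pyRange 1 10 1).filter (fun d4 =>
            (d1 + d2 == d3 + d4) && (PySem.Int.mod N (d1 + d2) == 0))).map (pvNum d1 d2 d3)))) from by
      funext acc d1; exact h2 d1 acc]
  rw [PySem.List.foldl_append_eq_flatMap _ _ _, List.nil_append]

-- B's result as a flatMap over the two-digit prefixes
lemma pvLB (N : Int) :
    generate_lucky_numbers_alt N =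
      (PySem.List.pyRange 11 100 1).flatMap (pvGB (fun s => PySem.Int.mod N s == 0)) := by
  have h1 : generate_lucky_numbers_alt N =
      (PySem.List.pyRange 11 100 1).foldl (fun result ab =>
        if PySem.Int.mod ab 10 == 0 then result
        else
          if PySem.Int.mod N (PySem.Int.floordiv ab 10 + PySem.Int.mod ab 10) == 0 then
            result ++ (pvBySum.getD (PySem.Int.floordiv ab 10 + PySem.Int.mod ab 10) []).map
              (fun cd => ab * 100 + cd)
          else result) [] := rfl
  rw [h1]
  rw [show (fun (result : List Int) ab =>
      if PySem.Int.mod ab 10 == 0 then result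
      else
        if PySem.Int.mod N (PySem.Int.floordiv ab 10 + PySem.Int.mod ab 10) == 0 then
          result ++ (pvBySum.getD (PySem.Int.floordiv ab 10 + PySem.Int.mod ab 10) []).map
            (fun cd => ab * 100 + cd)
        else result)
    = (fun (result : List Int) ab => result ++ pvGB (fun s => PySem.Int.mod N s == 0) ab) from by
      funext result ab
      unfold pvGB pvBlk
      beta_reduce
      cases hz : (PySem.Int.mod ab 10 == 0) <;>
        cases hf : (PySem.Int.mod N (PySem.Int.floordiv ab 10 + PySem.Int.mod ab 10) == 0) <;>
          simp]
  rw [PySem.List.foldl_append_eq_flatMap _ _ _, List.nil_append]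

-- one (d1,d2)-block of A equals B's block for the prefix 10*d1+d2
lemma pvBlockA (f : Int → Bool) (d1 d2 : Int)
    (hd1 : 1 ≤ d1) (hd1' : d1 ≤ 9) (hd2 : 1 ≤ d2) (hd2' : d2 ≤ 9) :
    (PySem.List.pyRange 1 10 1).flatMap (fun d3 =>
      ((PySem.List.pyRange 1 10 1).filter (fun d4 =>
        (d1 + d2 == d3 + d4) && f (d1 + d2))).map (pvNum d1 d2 d3))
    = pvGB f (10 * d1 + d2) := by
  obtain ⟨hfd, hmd⟩ := pv_divmod10 d1 d2 hd2 hd2' hd1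
  unfold pvGB pvBlk
  rw [hfd, hmd]
  rw [show (d2 == 0) = false from by simp; omega]
  cases hf : f (d1 + d2) with
  | false => simp
  | true =>
    simp only [if_true, Bool.and_true, cond_true, if_false, Bool.false_eq_true, ite_false, ite_true]
    rw [pvBySum_eval]
    interval_cases d1 <;> interval_cases d2 <;> decide

-- the 9×9 digit grid covers exactly the non-multiples of 10 among 11..99
lemma pvStruct (g : Int → List Int) (hz : ∀ k : Int, PySem.Int.mod k 10 = 0 → g k = []) :
    (PySem.List.pyRange 1 10 1).flatMap (fun d1 =>
      (PySem.List.pyRange 1 10 1).flatMap (fun d2 => g (10 * d1 + d2)))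
    = (PySem.List.pyRange 11 100 1).flatMap g := by
  rw [show PySem.List.pyRange 1 10 1 = [1,2,3,4,5,6,7,8,9] from by decide,
      show PySem.List.pyRange 11 100 1 = [11,12,13,14,15,16,17,18,19,20,21,22,23,24,25,26,27,28,29,30,31,32,33,34,35,36,37,38,39,40,41,42,43,44,45,46,47,48,49,50,51,52,53,54,55,56,57,58,59,60,61,62,63,64,65,66,67,68,69,70,71,72,73,74,75,76,77,78,79,80,81,82,83,84,85,86,87,88,89,90,91,92,93,94,95,96,97,98,99] from by decide]
  have z : ∀ m ∈ ([20,30,40,50,60,70,80,90] : List Int), g m = [] := by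
    intro m hm
    apply hz
    fin_cases hm <;> decide
  simp only [List.flatMap_cons, List.flatMap_nil, List.append_nil]
  norm_num
  rw [z 20 (by simp), z 30 (by simp), z 40 (by simp), z 50 (by simp), z 60 (by simp),
      z 70 (by simp), z 80 (by simp), z 90 (by simp)]
  simp

lemma pv_main (N : Int) : generate_lucky_numbers N = generate_lucky_numbers_alt N := by
  rw [pvLA N, pvLB N]
  rw [← pvStruct (pvGB (fun s => PySem.Int.mod N s == 0)) (by
    intro k hk
    unfold pvGB
    rw [show (PySem.Int.mod k 10 == 0) = true from by rw [hk]; decide]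
    simp)]
  apply List.flatMap_congr
  intro d1 hd1
  apply List.flatMap_congr
  intro d2 hd2
  rw [PySem.List.mem_pyRange_one] at hd1 hd2
  exact pvBlockA (fun s => PySem.Int.mod N s == 0) d1 d2 hd1.1 (by omega) hd2.1 (by omega)

-- ===== VERDICT (by name: the statement is the Claim_ definition above) =====
theorem generate_lucky_numbers_spec : Claim_equal_generate_lucky_numbers := by
  intro N _
  unfold Spec_generate_lucky_numbers
  exact pv_main N
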